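-- pv_equiv track=rewrite | github.com/Jafoor/Student-Feedback-Syatem | main/views.py | revpoint
-- ===== SOURCE A (Python) =====
-- def revpoint(l):
--
--     str2 = ""
--     i = 0
--     for j in range(0,l):
--         if j != l-1:
--             str2 += '0'
--             str2 += ','
--         else:
--             str2 += '0'
--     return str2
-- ===== SOURCE B (Python) =====
-- def revpoint(l):
--     return ('0,' * l)[:-1]
-- ===== Notes on version B (the rewrite author's own statement) =====
-- stated objective: idiomatic
-- what changed: Replaces the index loop with a last-element branch by a closed-form construction: repeat the unit '0,' l times and slice off the trailing comma.
import Mathlib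
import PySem

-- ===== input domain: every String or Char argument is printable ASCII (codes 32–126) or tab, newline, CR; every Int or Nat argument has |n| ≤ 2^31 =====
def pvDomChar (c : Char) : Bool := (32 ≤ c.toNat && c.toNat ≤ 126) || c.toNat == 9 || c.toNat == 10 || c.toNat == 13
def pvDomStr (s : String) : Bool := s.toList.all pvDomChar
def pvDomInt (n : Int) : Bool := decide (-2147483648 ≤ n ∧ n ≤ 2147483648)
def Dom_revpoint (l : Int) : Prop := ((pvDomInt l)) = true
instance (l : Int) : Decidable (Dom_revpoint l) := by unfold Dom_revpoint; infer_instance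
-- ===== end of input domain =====

-- B replaces the index loop (with its last-element branch) by the closed form ('0,' * l)[:-1].

-- ===== PORT A =====
-- str2 is built over List Char (the PySem string representation); '+='s become list appends.
def revpoint (l : Int) : String :=
  String.ofList ((PySem.List.pyRange 0 l 1).foldl
    (fun str2 j => if j ≠ l - 1 then (str2 ++ ['0']) ++ [','] else str2 ++ ['0']) [])

-- ===== PORT B =====
-- '0,' * l  is List.replicate l.toNat ['0', ','] flattened;  [:-1] is PySem.List.slice … (some (-1)).
def revpoint_alt (l : Int) : String :=
  String.ofList (PySem.List.slice ((List.replicate l.toNat ['0', ',']).flatten) none (some (-1)))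

-- ===== PRECONDITION & SPEC =====
def Spec_revpoint (l : Int) (out : String) : Prop := out = revpoint_alt l
instance (l : Int) (out : String) : Decidable (Spec_revpoint l out) := by unfold Spec_revpoint; infer_instance

-- ===== CLAIM (what is proved, stated in full; the proofs are below) =====
def Claim_equal_revpoint : Prop := ∀ (l : Int), Dom_revpoint l → Spec_revpoint l (revpoint l)

-- ===== LEMMAS AND PROOFS =====

-- folding a constant two-char append over any list of length n produces n copies of the unit
theorem pv_foldl_const (xs : List Int) (acc : List Char) :
    xs.foldl (fun s (_ : Int) => (s ++ ['0']) ++ [',']) acc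
      = acc ++ (List.replicate xs.length ['0', ',']).flatten := by
  induction xs generalizing acc with
  | nil => simp
  | cons x xs ih => simp [List.replicate_succ]

theorem pv_core (n : Nat) :
    (PySem.List.pyRange 0 (n : Int) 1).foldl
      (fun str2 j => if j ≠ (n : Int) - 1 then (str2 ++ ['0']) ++ [','] else str2 ++ ['0']) []
      = ((List.replicate n ['0', ',']).flatten).dropLast := by
  cases n with
  | zero => simp [PySem.List.pyRange_one_eq_nil]
  | succ m =>
    have hsplit : PySem.List.pyRange 0 ((m : Int) + 1) 1
        = PySem.List.pyRange 0 (m : Int) 1 ++ [(m : Int)] :=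
      PySem.List.pyRange_one_succ_right (by exact_mod_cast Nat.zero_le m)
    push_cast
    rw [hsplit, List.foldl_append]
    have hcongr : (PySem.List.pyRange 0 (m : Int) 1).foldl
        (fun str2 j => if j ≠ (m : Int) + 1 - 1 then (str2 ++ ['0']) ++ [','] else str2 ++ ['0']) []
        = (PySem.List.pyRange 0 (m : Int) 1).foldl
            (fun s (_ : Int) => (s ++ ['0']) ++ [',']) [] := by
      apply PySem.List.foldl_congr_mem
      intro acc x hx
      have hmem := (PySem.List.mem_pyRange_one).1 hx
      have hne : ¬ x = (m : Int) := by omega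
      simp [hne]
    rw [hcongr, pv_foldl_const, PySem.List.length_pyRange_one]
    have hm : ¬((m : Int) ≠ (m : Int) + 1 - 1) := by omega
    simp only [List.foldl_cons, List.foldl_nil, if_neg hm, List.nil_append]
    have hlen : ((m : Int) - 0).toNat = m := by omega
    simp only [Int.sub_zero, Int.toNat_natCast]
    rw [List.replicate_succ' (n := m), List.flatten_append]
    rw [show ((List.flatten [['0', ',']]) : List Char) = ['0'] ++ [','] by rfl, ← List.append_assoc,
      List.dropLast_concat]

theorem revpoint_eq_alt (l : Int) : revpoint l = revpoint_alt l := by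
  unfold revpoint revpoint_alt
  rw [PySem.List.slice_to_neg_one]
  by_cases hl : l ≤ 0
  · rw [PySem.List.pyRange_one_eq_nil hl]
    simp [Int.toNat_of_nonpos hl]
  · have hn : l = (l.toNat : Int) := (Int.toNat_of_nonneg (by omega)).symm
    rw [hn]
    exact congrArg String.ofList (pv_core l.toNat)

-- ===== VERDICT (by name: the statement is the Claim_ definition above) =====
theorem revpoint_spec : Claim_equal_revpoint := by
  intro l _
  exact revpoint_eq_alt l
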